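-- pv_equiv track=rewrite | github.com/szymonpokrywka42-spec/LxMonitor | core/handlers/cpp_handler1.py | _looks_recoverable_link_error
-- ===== SOURCE A (Python) =====
-- def _looks_recoverable_link_error(error_text):
--     t = (error_text or "").lower()
--     markers = (
--         "python version mismatch",
--         "undefined symbol",
--         "wrong elf class",
--         "invalid elf header",
--         "cannot open shared object file",
--         "file too short",
--     )
--     return any(m in t for m in markers)
-- ===== SOURCE B (Python) =====
-- _MARKERS = (
--     "python version mismatch",
--     "undefined symbol",
--     "wrong elf class",
--     "invalid elf header",
--     "cannot open shared object file",
--     "file too short",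
-- )
--
-- def _looks_recoverable_link_error(error_text):
--     t = (error_text or "").lower()
--     # single left-to-right sweep: at each position test whether any marker starts there
--     for i in range(len(t)):
--         for m in _MARKERS:
--             if t.startswith(m, i):
--                 return True
--     return False
-- ===== Notes on version B (the rewrite author's own statement) =====
-- stated objective: alternative
-- what changed: Replaced the six independent substring scans (one `m in t` per marker) by a single left-to-right sweep over the text that tests each position for a marker start.
import Mathlib
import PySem

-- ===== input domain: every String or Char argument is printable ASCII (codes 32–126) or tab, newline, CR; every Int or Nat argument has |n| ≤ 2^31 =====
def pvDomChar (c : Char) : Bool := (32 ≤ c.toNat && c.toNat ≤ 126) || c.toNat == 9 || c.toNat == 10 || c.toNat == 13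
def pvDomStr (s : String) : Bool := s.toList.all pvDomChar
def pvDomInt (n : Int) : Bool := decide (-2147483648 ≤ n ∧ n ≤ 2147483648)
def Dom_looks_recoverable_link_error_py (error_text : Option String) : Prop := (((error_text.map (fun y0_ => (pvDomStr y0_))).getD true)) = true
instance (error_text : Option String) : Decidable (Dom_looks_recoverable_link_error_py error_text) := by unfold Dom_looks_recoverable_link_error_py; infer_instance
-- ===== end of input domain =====

-- B replaces the six separate substring scans by one left-to-right sweep testing each
-- position for a marker start (objective: alternative traversal, same booleans).

def pvMarkers : List String :=
  [ "python version mismatch"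
  , "undefined symbol"
  , "wrong elf class"
  , "invalid elf header"
  , "cannot open shared object file"
  , "file too short" ]

-- ===== PORT A =====
-- `(error_text or "")`: None ↦ "", and a falsy (empty) string ↦ "" — equal to getD "".
def looks_recoverable_link_error_py (error_text : Option String) : Bool :=
  let t := PySem.Str.lower (error_text.getD "")
  pvMarkers.any (fun m => PySem.Str.isIn m t)

-- ===== PORT B =====
-- `t.startswith(m, i)` on 0 ≤ i ≤ len(t) is exactly a prefix test on the i-th suffix;
-- the sweep over i in range(len(t)) is the structural recursion over suffixes.
def pvScan (markers : List String) : List Char → Bool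
  | [] => false
  | c :: rest =>
      markers.any (fun m => PySem.Chars.startswith (c :: rest) m.toList) || pvScan markers rest

def looks_recoverable_link_error_py_alt (error_text : Option String) : Bool :=
  let t := PySem.Str.lower (error_text.getD "")
  pvScan pvMarkers t.toList

-- ===== PRECONDITION & SPEC =====
def Spec_looks_recoverable_link_error_py (error_text : Option String) (out : Bool) : Prop := out = looks_recoverable_link_error_py_alt error_text
instance (error_text : Option String) (out : Bool) : Decidable (Spec_looks_recoverable_link_error_py error_text out) := by unfold Spec_looks_recoverable_link_error_py; infer_instance

-- ===== CLAIM (what is proved, stated in full; the proofs are below) =====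
def Claim_equal_looks_recoverable_link_error_py : Prop := ∀ (error_text : Option String), Dom_looks_recoverable_link_error_py error_text → Spec_looks_recoverable_link_error_py error_text (looks_recoverable_link_error_py error_text)

-- ===== LEMMAS AND PROOFS =====

-- for nonempty markers, the sweep decides the same predicate as the six infix tests
lemma pvScan_eq_any_isIn (markers : List String) (h : ∀ m ∈ markers, m.toList ≠ [])
    (cs : List Char) :
    pvScan markers cs = markers.any (fun m => PySem.Chars.isIn m.toList cs) := by
  induction cs with
  | nil =>
      symm
      simp only [pvScan, List.any_eq_false]
      intro m hm
      rw [PySem.Chars.isIn_iff_infix]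
      intro hinf
      exact h m hm (List.eq_nil_of_infix_nil hinf)
  | cons c rest ih =>
      simp only [pvScan, ih]
      rw [Bool.eq_iff_iff]
      simp only [Bool.or_eq_true, List.any_eq_true, PySem.Chars.isIn_iff_infix,
        PySem.Chars.startswith_iff, List.infix_cons_iff]
      constructor
      · rintro (⟨m, hm, hp⟩ | ⟨m, hm, hi⟩)
        · exact ⟨m, hm, Or.inl hp⟩
        · exact ⟨m, hm, Or.inr hi⟩
      · rintro ⟨m, hm, hp | hi⟩
        · exact Or.inl ⟨m, hm, hp⟩
        · exact Or.inr ⟨m, hm, hi⟩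

-- ===== VERDICT (by name: the statement is the Claim_ definition above) =====
theorem looks_recoverable_link_error_py_spec : Claim_equal_looks_recoverable_link_error_py := by
  intro e _
  unfold Spec_looks_recoverable_link_error_py
  unfold looks_recoverable_link_error_py looks_recoverable_link_error_py_alt
  rw [pvScan_eq_any_isIn pvMarkers (by decide)]
  simp [PySem.Str.isIn_eq]
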